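-- pv_equiv track=rewrite | github.com/nightglyde/MattParkerXmasTree | make_sequence.py | snakeyFrame
-- ===== SOURCE A (Python) =====
-- def combineFrames(a, b):
--     num_lights = len(a)//3
--     frame = []
--     for i in range(num_lights):
--         ra, ga, ba = a[i*3], a[i*3+1], a[i*3+2]
--         rb, gb, bb = b[i*3], b[i*3+1], b[i*3+2]
--
--         if ra or ga or ba:
--             frame.extend([ra, ga, ba])
--         else:
--             frame.extend([rb, gb, bb])
--     return frame
--
-- def snakeyFrame(args):
--     n, coords, orig_sequence, snakey_frames = args
--
--     num_frames = len(orig_sequence)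
--
--     frame = [0 for i in range(len(coords)*3)]
--     for s in range(snakey_frames):
--         f = (n+s)%num_frames
--         frame = combineFrames(orig_sequence[f], frame)
--     return frame
-- ===== SOURCE B (Python) =====
-- def _triple(frame, i):
--     return [frame[i*3], frame[i*3+1], frame[i*3+2]]
--
-- def snakeyFrame(args):
--     n, coords, orig_sequence, snakey_frames = args
--     num_frames = len(orig_sequence)
--     if snakey_frames <= 0:
--         return [0] * (len(coords) * 3)
--     last = orig_sequence[(n + snakey_frames - 1) % num_frames]
--     out_lights = len(last) // 3
--     result = []
--     for i in range(out_lights):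
--         triple = [0, 0, 0]
--         for s in range(snakey_frames - 1, -1, -1):
--             cand = _triple(orig_sequence[(n + s) % num_frames], i)
--             if cand[0] or cand[1] or cand[2]:
--                 triple = cand
--                 break
--         result += triple
--     return result
-- ===== Notes on version B (the rewrite author's own statement) =====
-- stated objective: faster
-- what changed: B transposes A's frame-outer/light-inner overlay loop into a light-outer/frame-inner scan that takes, per light, the last non-zero RGB triple (scanning steps high-to-low with an early break) instead of rebuilding the whole combined frame at every step.
import Mathlib
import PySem

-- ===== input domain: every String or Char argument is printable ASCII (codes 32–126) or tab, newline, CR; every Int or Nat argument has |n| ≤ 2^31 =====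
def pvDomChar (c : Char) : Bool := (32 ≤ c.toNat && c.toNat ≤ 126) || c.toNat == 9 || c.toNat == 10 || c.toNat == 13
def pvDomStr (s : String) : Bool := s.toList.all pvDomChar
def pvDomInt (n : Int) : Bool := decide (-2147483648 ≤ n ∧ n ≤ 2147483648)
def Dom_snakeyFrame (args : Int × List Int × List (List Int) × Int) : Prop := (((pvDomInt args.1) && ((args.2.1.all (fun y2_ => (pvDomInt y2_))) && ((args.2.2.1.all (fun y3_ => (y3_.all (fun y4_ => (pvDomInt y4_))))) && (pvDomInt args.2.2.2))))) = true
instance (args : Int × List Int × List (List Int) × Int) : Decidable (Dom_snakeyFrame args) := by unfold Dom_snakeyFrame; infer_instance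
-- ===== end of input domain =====

-- B transposes A's frame-outer/light-inner overlay into a light-outer scan taking the last
-- non-zero triple (objective: alternative decomposition; avoids rebuilding the full frame per step).


-- ===== PORT A =====
-- literal port of combineFrames; pyGetD is exact where Python's indexing is in range (Pre_ ensures it)
def combineFrames (a b : List Int) : List Int :=
  (List.range (a.length / 3)).foldl (fun frame (i : Nat) =>
    let ra := PySem.List.pyGetD a ((i : Int)*3) 0
    let ga := PySem.List.pyGetD a ((i : Int)*3+1) 0
    let ba := PySem.List.pyGetD a ((i : Int)*3+2) 0
    let rb := PySem.List.pyGetD b ((i : Int)*3) 0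
    let gb := PySem.List.pyGetD b ((i : Int)*3+1) 0
    let bb := PySem.List.pyGetD b ((i : Int)*3+2) 0
    frame ++ (if ra ≠ 0 ∨ ga ≠ 0 ∨ ba ≠ 0 then [ra, ga, ba] else [rb, gb, bb])) []

def snakeyFrame (args : Int × List Int × List (List Int) × Int) : List Int :=
  let n := args.1
  let coords := args.2.1
  let seq := args.2.2.1
  let k := args.2.2.2
  let frame0 := (List.range (coords.length * 3)).map (fun _ => (0 : Int))
  (PySem.List.pyRange 0 k 1).foldl (fun frame s =>
    let f := PySem.Int.mod (n + s) (seq.length : Int)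
    combineFrames (PySem.List.pyGetD seq f []) frame) frame0

-- ===== PORT B =====
-- _triple; pyGetD is exact where Python's indexing is in range (Pre_ ensures it)
def triAt (fr : List Int) (i : Nat) : List Int :=
  [PySem.List.pyGetD fr ((i : Int)*3) 0,
   PySem.List.pyGetD fr ((i : Int)*3+1) 0,
   PySem.List.pyGetD fr ((i : Int)*3+2) 0]

-- the inner 'for s in range(k-1, -1, -1): … break' loop of Source B, as a countdown recursion
def scanLight (n : Int) (seq : List (List Int)) (i : Nat) : Nat → List Int
  | 0 => [0, 0, 0]
  | t+1 =>
    let cand := triAt (PySem.List.pyGetD seq (PySem.Int.mod (n + (t : Int)) (seq.length : Int)) []) i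
    if PySem.List.pyGetD cand 0 0 ≠ 0 ∨ PySem.List.pyGetD cand 1 0 ≠ 0 ∨ PySem.List.pyGetD cand 2 0 ≠ 0
    then cand else scanLight n seq i t

def snakeyFrame_alt (args : Int × List Int × List (List Int) × Int) : List Int :=
  let n := args.1
  let coords := args.2.1
  let seq := args.2.2.1
  let k := args.2.2.2
  if k ≤ 0 then List.replicate (coords.length * 3) 0
  else
    let last := PySem.List.pyGetD seq (PySem.Int.mod (n + k - 1) (seq.length : Int)) []
    let outLights := last.length / 3
    (List.range outLights).foldl (fun res (i : Nat) => res ++ scanLight n seq i k.toNat) []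

-- ===== PRECONDITION & SPEC =====
-- helpers for Pre_: the frame processed at step s, and its light count
def frameAt (n : Int) (seq : List (List Int)) (s : Nat) : List Int :=
  PySem.List.pyGetD seq (PySem.Int.mod (n + (s : Int)) (seq.length : Int)) []
def lightsAt (n : Int) (seq : List (List Int)) (s : Nat) : Nat :=
  (frameAt n seq s).length / 3

-- Pre_ is exactly A's return set: with a positive step count A needs a non-empty sequence
-- (else % raises ZeroDivisionError) and each processed frame's light count at most the previous
-- combined frame's (else reading b[i*3] in combineFrames raises IndexError); the step conditions
-- are periodic in s with period (number of frames), so checking min(k, len+1) steps covers all k.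
def Pre_snakeyFrame (args : Int × List Int × List (List Int) × Int) : Prop :=
  args.2.2.2 ≤ 0 ∨
    (args.2.2.1 ≠ [] ∧ ∀ s ∈ List.range (min args.2.2.2.toNat (args.2.2.1.length + 1)),
      lightsAt args.1 args.2.2.1 s ≤
        (if s = 0 then args.2.1.length else lightsAt args.1 args.2.2.1 (s - 1)))
instance (args : Int × List Int × List (List Int) × Int) : Decidable (Pre_snakeyFrame args) := by
  unfold Pre_snakeyFrame; infer_instance

def pvWitness_snakeyFrame : (Int × List Int × List (List Int) × Int) := (0, [0], [[1, 2, 3]], 1)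

def Spec_snakeyFrame (args : Int × List Int × List (List Int) × Int) (out : List Int) : Prop := out = snakeyFrame_alt args
instance (args : Int × List Int × List (List Int) × Int) (out : List Int) : Decidable (Spec_snakeyFrame args out) := by unfold Spec_snakeyFrame; infer_instance

-- ===== CLAIM (what is proved, stated in full; the proofs are below) =====
def Claim_equal_snakeyFrame : Prop := ∀ (args : Int × List Int × List (List Int) × Int), Dom_snakeyFrame args → Pre_snakeyFrame args → Spec_snakeyFrame args (snakeyFrame args)

-- ===== LEMMAS AND PROOFS =====

-- each scanLight result is a 3-element list
theorem scanLight_length (n : Int) (seq : List (List Int)) (i t : Nat) :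
    (scanLight n seq i t).length = 3 := by
  induction t with
  | zero => rfl
  | succ t ih => simp only [scanLight]; split <;> simp [triAt, ih]

-- A's fold as structural recursion over the step count
def overlay (n : Int) (seq : List (List Int)) (init : List Int) : Nat → List Int
  | 0 => init
  | t+1 => combineFrames (frameAt n seq t) (overlay n seq init t)

theorem foldl_range_overlay (n : Int) (seq : List (List Int)) (init : List Int) (t : Nat) :
    (List.range t).foldl (fun frame s => combineFrames (frameAt n seq s) frame) init
      = overlay n seq init t := by
  induction t with
  | zero => rfl
  | succ t ih => rw [List.range_succ, List.foldl_append, ih]; rfl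

theorem combine_eq (a b : List Int) :
    combineFrames a b
      = (List.range (a.length / 3)).flatMap (fun (i : Nat) =>
          if PySem.List.pyGetD a ((i : Int)*3) 0 ≠ 0 ∨ PySem.List.pyGetD a ((i : Int)*3+1) 0 ≠ 0
             ∨ PySem.List.pyGetD a ((i : Int)*3+2) 0 ≠ 0
          then triAt a i else triAt b i) := by
  unfold combineFrames
  rw [PySem.List.foldl_append_eq_flatMap]
  rw [List.nil_append]
  exact List.flatMap_congr (fun i _ => by simp only [triAt])

theorem length_flatMap_tri (g : Nat → List Int) (m : Nat) (hg : ∀ i, (g i).length = 3) :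
    ((List.range m).flatMap g).length = 3 * m := by
  induction m with
  | zero => rfl
  | succ m ih =>
    rw [List.range_succ, List.flatMap_append]
    simp only [List.length_append, ih]
    simp [hg]; ring

theorem getD_flatMap_tri (g : Nat → List Int) (m i j : Nat) (hg : ∀ i, (g i).length = 3)
    (hi : i < m) (hj : j < 3) :
    ((List.range m).flatMap g).getD (i * 3 + j) 0 = (g i).getD j 0 := by
  induction m with
  | zero => omega
  | succ m ih =>
    rw [List.range_succ, List.flatMap_append]
    by_cases h : i < m
    · rw [List.getD_append]
      · exact ih h
      · have := length_flatMap_tri g m hg; omega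
    · have hi' : i = m := by omega
      subst hi'
      rw [List.getD_append_right]
      · have := length_flatMap_tri g i hg
        simp only [this]
        have : i * 3 + j - 3 * i = j := by omega
        simp [this]
      · have := length_flatMap_tri g i hg; omega

-- a 3-element list equals the triple of its entries
theorem tri_of_length_three (x : List Int) (h : x.length = 3) :
    x = [x.getD 0 0, x.getD 1 0, x.getD 2 0] := by
  match x, h with
  | [a, b, c], _ => rfl

theorem triAt_eq_getD (x : List Int) (i : Nat) :
    triAt x i = [x.getD (i*3) 0, x.getD (i*3+1) 0, x.getD (i*3+2) 0] := by
  have h0 : ((i : Int)*3) = ((i*3 : Nat) : Int) := by push_cast; ring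
  have h1 : ((i : Int)*3+1) = ((i*3+1 : Nat) : Int) := by push_cast; ring
  have h2 : ((i : Int)*3+2) = ((i*3+2 : Nat) : Int) := by push_cast; ring
  unfold triAt
  rw [h2, h1, h0, PySem.List.pyGetD_natCast, PySem.List.pyGetD_natCast, PySem.List.pyGetD_natCast]

theorem flatMap_const_zero (m : Nat) :
    (List.range m).flatMap (fun _ => ([0, 0, 0] : List Int)) = List.replicate (m * 3) 0 := by
  induction m with
  | zero => rfl
  | succ m ih =>
    rw [List.range_succ, List.flatMap_append, ih]
    show List.replicate (m * 3) 0 ++ List.replicate 3 0 = List.replicate ((m + 1) * 3) 0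
    rw [List.replicate_append_replicate, show m * 3 + 3 = (m + 1) * 3 from by ring]

-- main invariant: after t overlay steps the frame is the light-wise scan
theorem overlay_eq_scan (n : Int) (seq : List (List Int)) (coords : List Int) (t : Nat)
    (hc : ∀ s, s < t → lightsAt n seq s ≤ (if s = 0 then coords.length else lightsAt n seq (s - 1))) :
    overlay n seq ((List.range (coords.length * 3)).map (fun _ => (0 : Int))) t
      = (List.range (if t = 0 then coords.length else lightsAt n seq (t - 1))).flatMap
          (fun i => scanLight n seq i t) := by
  induction t with
  | zero =>
    show (List.range (coords.length * 3)).map (fun _ => (0 : Int))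
        = (List.range coords.length).flatMap (fun i => scanLight n seq i 0)
    have h1 : (List.range coords.length).flatMap (fun i => scanLight n seq i 0)
        = (List.range coords.length).flatMap (fun _ => ([0, 0, 0] : List Int)) :=
      List.flatMap_congr (fun i _ => rfl)
    rw [h1, flatMap_const_zero, List.map_const', List.length_range]
  | succ t ih =>
    have hct : lightsAt n seq t ≤ (if t = 0 then coords.length else lightsAt n seq (t - 1)) :=
      hc t (Nat.lt_succ_self t)
    have ih' := ih (fun s hs => hc s (Nat.lt_succ_of_lt hs))
    simp only [overlay, ih', combine_eq]
    have hflen : ∀ i, (scanLight n seq i t).length = 3 := fun i => scanLight_length n seq i t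
    have hargs : (frameAt n seq t).length / 3 = lightsAt n seq t := rfl
    rw [hargs]
    have hif : (if t + 1 = 0 then coords.length else lightsAt n seq (t + 1 - 1))
        = lightsAt n seq t := if_neg (Nat.succ_ne_zero t)
    rw [hif]
    apply List.flatMap_congr
    intro i hi
    have hi' : i < lightsAt n seq t := List.mem_range.mp hi
    have hib : i < (if t = 0 then coords.length else lightsAt n seq (t - 1)) := lt_of_lt_of_le hi' hct
    have htri : triAt ((List.range (if t = 0 then coords.length else lightsAt n seq (t - 1))).flatMap
        (fun j => scanLight n seq j t)) i = scanLight n seq i t := by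
      have g0 := getD_flatMap_tri (fun j => scanLight n seq j t) _ i 0 hflen hib (by omega)
      have g1 := getD_flatMap_tri (fun j => scanLight n seq j t) _ i 1 hflen hib (by omega)
      have g2 := getD_flatMap_tri (fun j => scanLight n seq j t) _ i 2 hflen hib (by omega)
      simp only [Nat.add_zero] at g0
      rw [triAt_eq_getD, g0, g1, g2]
      exact (tri_of_length_three _ (hflen i)).symm
    rw [htri]
    -- match with the unfolding of scanLight at t+1
    simp only [scanLight, frameAt, triAt]
    simp [PySem.List.pyGetD_zero_cons]
    rfl

theorem lightsAt_period (n : Int) (seq : List (List Int)) (s : Nat) (hne : seq ≠ []) :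
    lightsAt n seq (s + seq.length) = lightsAt n seq s := by
  have hpos : (0 : Int) < (seq.length : Int) := by
    have : seq.length ≠ 0 := fun h => hne (List.eq_nil_of_length_eq_zero h)
    omega
  unfold lightsAt frameAt
  have hmod : PySem.Int.mod (n + ((s + seq.length : Nat) : Int)) (seq.length : Int)
      = PySem.Int.mod (n + (s : Nat)) (seq.length : Int) := by
    rw [PySem.Int.mod_eq_emod_of_pos hpos, PySem.Int.mod_eq_emod_of_pos hpos]
    push_cast
    rw [show n + ((s : Int) + (seq.length : Int)) = (n + (s : Int)) + (seq.length : Int) from by ring,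
        Int.add_emod_right]
  rw [hmod]

theorem chain_extend (n : Int) (seq : List (List Int)) (coords : List Int) (k : Nat) (hne : seq ≠ [])
    (h : ∀ s, s < min k (seq.length + 1) →
      lightsAt n seq s ≤ (if s = 0 then coords.length else lightsAt n seq (s - 1))) :
    ∀ s, s < k → lightsAt n seq s ≤ (if s = 0 then coords.length else lightsAt n seq (s - 1)) := by
  intro s
  induction s using Nat.strong_induction_on with
  | _ s ih =>
    intro hs
    by_cases hb : s < min k (seq.length + 1)
    · exact h s hb
    · -- s ≥ seq.length + 1 (and seq.length ≥ 1), so shift down by one period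
      have hlen : 1 ≤ seq.length := by
        have : seq.length ≠ 0 := fun h0 => hne (List.eq_nil_of_length_eq_zero h0)
        omega
      have hs1 : seq.length + 1 ≤ s := by omega
      have hprev := ih (s - seq.length) (by omega) (by omega)
      rw [if_neg (by omega : ¬ (s - seq.length = 0))] at hprev
      have e1 : lightsAt n seq s = lightsAt n seq (s - seq.length) := by
        rw [← lightsAt_period n seq (s - seq.length) hne, Nat.sub_add_cancel (by omega)]
      have e2 : lightsAt n seq (s - 1) = lightsAt n seq (s - seq.length - 1) := by
        rw [← lightsAt_period n seq (s - seq.length - 1) hne,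
            show s - seq.length - 1 + seq.length = s - 1 from by omega]
      rw [if_neg (by omega : ¬ (s = 0)), e1, e2]
      exact hprev

theorem pyfold_eq_overlay (n : Int) (seq : List (List Int)) (init : List Int) (k : Int) :
    (PySem.List.pyRange 0 k 1).foldl (fun frame s =>
        combineFrames (PySem.List.pyGetD seq (PySem.Int.mod (n + s) (seq.length : Int)) []) frame) init
      = overlay n seq init (k - 0).toNat := by
  rw [PySem.List.pyRange_one, List.foldl_map]
  simp only [zero_add]
  exact foldl_range_overlay n seq init (k - 0).toNat

-- ===== VERDICT (by name: the statement is the Claim_ definition above) =====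
theorem snakeyFrame_spec : Claim_equal_snakeyFrame := by
  intro args _hdom hpre
  obtain ⟨n, coords, seq, k⟩ := args
  unfold Spec_snakeyFrame snakeyFrame snakeyFrame_alt
  by_cases hk : k ≤ 0
  · simp only [hk, if_pos]
    rw [PySem.List.pyRange_one_eq_nil hk]
    simp [List.map_const']
  · have hk' : 0 < k := lt_of_not_ge hk
    simp only [if_neg hk]
    rcases hpre with h | ⟨hne, hchain⟩
    · exact absurd (show k ≤ 0 from h) hk
    have hchain' : ∀ s, s < k.toNat →
        lightsAt n seq s ≤ (if s = 0 then coords.length else lightsAt n seq (s - 1)) :=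
      chain_extend n seq coords k.toNat hne (fun s hs => hchain s (List.mem_range.mpr hs))
    rw [pyfold_eq_overlay n seq _ k]
    have hkk : (k - 0).toNat = k.toNat := by omega
    rw [hkk, overlay_eq_scan n seq coords k.toNat hchain']
    rw [PySem.List.foldl_append_eq_flatMap, List.nil_append]
    have ht0 : k.toNat ≠ 0 := by omega
    rw [if_neg ht0]
    have hcast : ((k.toNat - 1 : Nat) : Int) = k - 1 := by omega
    have harg : lightsAt n seq (k.toNat - 1)
        = (PySem.List.pyGetD seq (PySem.Int.mod (n + k - 1) (seq.length : Int)) []).length / 3 := by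
      unfold lightsAt frameAt
      rw [hcast, show n + (k - 1) = n + k - 1 from by ring]
    rw [harg]
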